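-- pv_equiv track=rewrite | github.com/Devconf/Algorithm | 코딩테스트/Python/kakao_test_1.py | solution
-- ===== SOURCE A (Python) =====
-- def solution(s):
--     answer = ""
--     end_idx=0
--     data = ["zero","one","two","three","four","five",
--             "six","seven","eight","nine"]
--
--     find_idx = 0
--     while True:
--         if find_idx >= len(s):
--             break
--
--         if s[find_idx].isdigit():
--             answer+=s[find_idx]
--         else:
--             for idx, val in enumerate(data):
--                 tmp_idx = s[find_idx:].find(val)
--                 if tmp_idx == 0:
--                     answer+=str(idx)
--                     find_idx+=len(val) -1
--                     break
--
--         find_idx+=1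
--
--     return answer
-- ===== SOURCE B (Python) =====
-- import re
--
-- _WORDS = ["zero", "one", "two", "three", "four", "five",
--           "six", "seven", "eight", "nine"]
-- _DIGIT = {w: str(i) for i, w in enumerate(_WORDS)}
-- _PAT = re.compile("|".join(_WORDS) + "|[0-9]")
--
--
-- def solution(s):
--     return "".join(_DIGIT.get(m.group(), m.group()) for m in _PAT.finditer(s))
-- ===== Notes on version B (the rewrite author's own statement) =====
-- stated objective: faster
-- what changed: Replaces the hand-written index-walking while loop (with an inner enumerate loop calling str.find on the whole remaining string per word) by a single compiled regex alternation of the ten digit words plus [0-9], consumed in one re.finditer pass with a precomputed word-to-digit map.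
import Mathlib
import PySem

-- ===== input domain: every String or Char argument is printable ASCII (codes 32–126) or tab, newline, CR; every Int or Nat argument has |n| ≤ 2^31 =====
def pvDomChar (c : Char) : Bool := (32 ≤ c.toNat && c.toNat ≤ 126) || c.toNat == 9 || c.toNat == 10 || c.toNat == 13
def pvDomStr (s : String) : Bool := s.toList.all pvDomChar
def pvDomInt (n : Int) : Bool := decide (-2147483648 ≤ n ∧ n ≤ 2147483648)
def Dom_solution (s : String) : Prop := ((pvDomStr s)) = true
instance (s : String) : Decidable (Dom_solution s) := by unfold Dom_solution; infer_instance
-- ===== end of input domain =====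

-- B replaces A's hand-written index-walking loop (with an inner enumerate + str.find scan of
-- the whole remaining string per word) by one regex-finditer pass over a compiled alternation
-- of the ten digit words plus [0-9], with a precomputed word→digit map (idiomatic).

-- ===== PORT A =====
-- Python `data` (list of strings, kept as lists of chars).
def dataA : List (List Char) :=
  [['z', 'e', 'r', 'o'], ['o', 'n', 'e'], ['t', 'w', 'o'], ['t', 'h', 'r', 'e', 'e'], ['f', 'o', 'u', 'r'],
   ['f', 'i', 'v', 'e'], ['s', 'i', 'x'], ['s', 'e', 'v', 'e', 'n'], ['e', 'i', 'g', 'h', 't'], ['n', 'i', 'n', 'e']]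

-- the inner `for idx, val in enumerate(data): … if tmp_idx == 0: … break` loop:
-- returns `some (idx, len val)` for the first word whose find in the rest is 0.
def solutionInner (rest : List Char) : List (Int × List Char) → Option (Int × Nat)
  | [] => none
  | (idx, val) :: t =>
      if PySem.Chars.find rest val = 0 then some (idx, val.length)
      else solutionInner rest t

-- used only for termination of the while loop below
theorem solutionInner_pos (rest : List Char) (l : List (Int × List Char))
    (hl : ∀ p ∈ l, 1 ≤ p.2.length) (idx : Int) (wlen : Nat)
    (h : solutionInner rest l = some (idx, wlen)) : 1 ≤ wlen := by
  induction l with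
  | nil => simp [solutionInner] at h
  | cons p t ih =>
      obtain ⟨i, v⟩ := p
      by_cases hf : PySem.Chars.find rest v = 0
      · simp [solutionInner, hf] at h
        exact h.2 ▸ hl (i, v) (by simp)
      · simp [solutionInner, hf] at h
        exact ih (fun q hq => hl q (by simp [hq])) h

-- the `while True:` loop, indexed by find_idx
def solutionGo (cs : List Char) (i : Nat) : List Char :=
  if h : i < cs.length then
    let c := cs[i]
    if PySem.Chars.isdigit c then c :: solutionGo cs (i + 1)
    else
      match hm : solutionInner (cs.drop i) (PySem.List.enumerate dataA) with
      | some (idx, wlen) =>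
          (PySem.Int.toStr idx).toList ++ solutionGo cs (i + wlen - 1 + 1)
      | none => solutionGo cs (i + 1)
  else []
termination_by cs.length - i
decreasing_by
  · omega
  · have : 1 ≤ wlen :=
      solutionInner_pos _ _ (by decide) _ _ hm
    omega
  · omega

def solution (s : String) : String := String.mk (solutionGo s.toList 0)

-- ===== PORT B =====
-- Source B's _WORDS together with its _DIGIT map (word → digit character).
def wordsB : List (List Char × Char) :=
  [(['z', 'e', 'r', 'o'], '0'), (['o', 'n', 'e'], '1'), (['t', 'w', 'o'], '2'),
   (['t', 'h', 'r', 'e', 'e'], '3'), (['f', 'o', 'u', 'r'], '4'), (['f', 'i', 'v', 'e'], '5'),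
   (['s', 'i', 'x'], '6'), (['s', 'e', 'v', 'e', 'n'], '7'), (['e', 'i', 'g', 'h', 't'], '8'),
   (['n', 'i', 'n', 'e'], '9')]

-- Hand port of `re.finditer` for this fixed pattern (word1|…|word10|[0-9]): at each position the
-- first alternative that matches is consumed whole, unmatched characters are skipped; exact for
-- this alternation since no alternative is a prefix of text matched by an earlier one.
def altGo (cs : List Char) : List Char :=
  match cs with
  | [] => []
  | c :: rest =>
    match hm : wordsB.find? (fun p => p.1.isPrefixOf (c :: rest)) with
    | some p => p.2 :: altGo ((c :: rest).drop p.1.length)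
    | none =>
        if '0' ≤ c ∧ c ≤ '9' then c :: altGo rest else altGo rest
termination_by cs.length
decreasing_by
  · have hp := List.mem_of_find?_eq_some hm
    have : 1 ≤ p.1.length := by
      fin_cases hp <;> decide
    simp
    omega
  · simp
  · simp

def solution_alt (s : String) : String := String.mk (altGo s.toList)

-- ===== PRECONDITION & SPEC =====
def Spec_solution (s : String) (out : String) : Prop := out = solution_alt s
instance (s : String) (out : String) : Decidable (Spec_solution s out) := by unfold Spec_solution; infer_instance

-- ===== CLAIM (what is proved, stated in full; the proofs are below) =====
def Claim_equal_solution : Prop := ∀ (s : String), Dom_solution s → Spec_solution s (solution s)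

-- ===== LEMMAS AND PROOFS =====

-- s.find(sub) == 0 exactly when sub is a prefix
theorem find_eq_zero_iff (rest w : List Char) :
    PySem.Chars.find rest w = 0 ↔ w <+: rest := by
  constructor
  · intro h
    have h0 : (0 : Int) ≤ PySem.Chars.find rest w := by omega
    have := (PySem.Chars.find_spec h0).1
    rwa [h] at this
  · intro h
    have h0 : (0 : Int) ≤ PySem.Chars.find rest w :=
      (PySem.Chars.find_nonneg_iff _ _).2 h.isInfix
    rcases (PySem.Chars.find_spec h0).2 with hmin
    by_contra hne
    have hpos : 0 < (PySem.Chars.find rest w).toNat := by omega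
    exact hmin 0 hpos (by simpa using h)

-- A's inner enumerate-scan and B's alternation lookup agree (same ten words, same order)
theorem scan_eq (rest : List Char) :
    (match solutionInner rest (PySem.List.enumerate dataA) with
     | some (idx, wlen) => some ((PySem.Int.toStr idx).toList, wlen)
     | none => none)
    =
    (match wordsB.find? (fun p => p.1.isPrefixOf rest) with
     | some p => some ([p.2], p.1.length)
     | none => none) := by
  simp only [solutionInner, dataA, PySem.List.enumerate, find_eq_zero_iff,
    ← List.isPrefixOf_iff_prefix, wordsB, List.find?]
  cases _h : List.isPrefixOf ['z','e','r','o'] rest <;> [skip; rfl] <;>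
  (cases _h : List.isPrefixOf ['o','n','e'] rest <;> [skip; rfl]) <;>
  (cases _h : List.isPrefixOf ['t','w','o'] rest <;> [skip; rfl]) <;>
  (cases _h : List.isPrefixOf ['t','h','r','e','e'] rest <;> [skip; rfl]) <;>
  (cases _h : List.isPrefixOf ['f','o','u','r'] rest <;> [skip; rfl]) <;>
  (cases _h : List.isPrefixOf ['f','i','v','e'] rest <;> [skip; rfl]) <;>
  (cases _h : List.isPrefixOf ['s','i','x'] rest <;> [skip; rfl]) <;>
  (cases _h : List.isPrefixOf ['s','e','v','e','n'] rest <;> [skip; rfl]) <;>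
  (cases _h : List.isPrefixOf ['e','i','g','h','t'] rest <;> [skip; rfl]) <;>
  (cases _h : List.isPrefixOf ['n','i','n','e'] rest <;> rfl)

theorem go_eq (n : Nat) : ∀ (cs : List Char) (i : Nat), cs.length - i ≤ n →
    solutionGo cs i = altGo (cs.drop i) := by
  induction n with
  | zero =>
      intro cs i h
      have hge : ¬ i < cs.length := by omega
      rw [solutionGo]
      simp [hge, List.drop_eq_nil_of_le (by omega : cs.length ≤ i), altGo]
  | succ n ih =>
      intro cs i h
      by_cases hlt : i < cs.length
      · have hdrop : cs.drop i = cs[i] :: cs.drop (i + 1) :=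
          List.drop_eq_getElem_cons hlt
        set c := cs[i] with hc
        by_cases hd : PySem.Chars.isdigit c
        · -- digit character: no word is a prefix (every word starts with a letter)
          have hdig : '0' ≤ c ∧ c ≤ '9' := by
            simpa [PySem.Chars.isdigit] using hd
          have hnone : wordsB.find? (fun p => p.1.isPrefixOf (c :: cs.drop (i + 1))) = none := by
            rw [List.find?_eq_none]
            intro p hp
            simp only [← Bool.not_eq_true, List.isPrefixOf_iff_prefix]
            fin_cases hp <;>
              · intro hpre
                rw [List.cons_prefix_cons] at hpre
                obtain ⟨he, -⟩ := hpre
                rw [← he] at hdig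
                exact absurd hdig (by decide)
          rw [solutionGo]
          simp only [hlt, dif_pos, ← hc, hd, if_pos]
          rw [hdrop, altGo, hnone]
          simp only [hdig, and_self, if_pos, List.cons.injEq, true_and]
          exact ih cs (i + 1) (by omega)
        · -- non-digit: both sides scan the ten words in order
          have hnd : ¬ ('0' ≤ c ∧ c ≤ '9') := by
            simpa [PySem.Chars.isdigit] using hd
          have hs := scan_eq (cs.drop i)
          rw [solutionGo]
          simp only [hlt, dif_pos, ← hc, hd, if_neg, not_false_iff, Bool.false_eq_true]
          conv_rhs => rw [hdrop, altGo, ← hdrop]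
          split
          case _ idx wlen hin =>
            rw [hin] at hs
            split
            case _ p hf =>
              rw [hf] at hs
              simp only [Option.some.injEq, Prod.mk.injEq] at hs
              obtain ⟨hts, hwl⟩ := hs
              have hw1 : 1 ≤ wlen := solutionInner_pos _ _ (by decide) _ _ hin
              have harr : i + wlen - 1 + 1 = i + wlen := by omega
              rw [harr, hts, List.drop_drop, ← hwl]
              simpa using ih cs (i + wlen) (by omega)
            case _ hf => rw [hf] at hs; simp at hs
          case _ hin =>
            rw [hin] at hs
            split
            case _ p hf => rw [hf] at hs; simp at hs
            case _ hf =>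
              simp only [hnd, if_neg, not_false_iff]
              exact ih cs (i + 1) (by omega)
      · rw [solutionGo]
        simp [hlt, List.drop_eq_nil_of_le (by omega : cs.length ≤ i), altGo]

-- ===== VERDICT (by name: the statement is the Claim_ definition above) =====
theorem solution_spec : Claim_equal_solution := by
  intro s _
  unfold Spec_solution solution solution_alt
  rw [show s.toList = s.toList.drop 0 from rfl] at *
  exact congrArg String.mk (go_eq s.toList.length s.toList 0 (by omega))
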